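-- pv_equiv track=rewrite | github.com/eliottcassidy2000/math | 04-computation/gaussian_integer_investigation.py | find_odd_cycle_vertex_sets
-- ===== SOURCE A (Python) =====
-- from itertools import combinations, permutations
--
-- def find_odd_cycle_vertex_sets(T):
--     n = len(T)
--     cycle_vsets = set()
--     for length in range(3, n + 1, 2):
--         for combo in combinations(range(n), length):
--             vset = frozenset(combo)
--             if vset in cycle_vsets:
--                 continue
--             first = combo[0]
--             for perm in permutations(combo[1:]):
--                 path = (first,) + perm
--                 if all(T[path[i]][path[(i + 1) % length]] for i in range(length)):
--                     cycle_vsets.add(vset)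
--                     break
--     return list(cycle_vsets)
-- ===== SOURCE B (Python) =====
-- from itertools import combinations
--
-- def find_odd_cycle_vertex_sets(T):
--     n = len(T)
--
--     def extend(last, remaining, first):
--         # try to complete a path ending at `last` through all of `remaining` and back to `first`
--         if not remaining:
--             return bool(T[last][first])
--         for i, v in enumerate(remaining):
--             if T[last][v] and extend(v, remaining[:i] + remaining[i + 1:], first):
--                 return True
--         return False
--
--     out = []
--     for length in range(3, n + 1, 2):
--         for combo in combinations(range(n), length):
--             first = combo[0]
--             if extend(first, list(combo[1:]), first):
--                 out.append(set(combo))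
--     return out
-- ===== Notes on version B (the rewrite author's own statement) =====
-- stated objective: alternative
-- what changed: B replaces A's exhaustive enumeration of all (k-1)! permutations of each candidate vertex set (checking every cycle edge only afterwards) by a recursive backtracking search that extends a path one vertex at a time and only along existing edges, pruning dead prefixes immediately.
-- outside the precondition, e.g. on find_odd_cycle_vertex_sets([[0, 0, 0], [], []]): A returns [], B returns []
import Mathlib
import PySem

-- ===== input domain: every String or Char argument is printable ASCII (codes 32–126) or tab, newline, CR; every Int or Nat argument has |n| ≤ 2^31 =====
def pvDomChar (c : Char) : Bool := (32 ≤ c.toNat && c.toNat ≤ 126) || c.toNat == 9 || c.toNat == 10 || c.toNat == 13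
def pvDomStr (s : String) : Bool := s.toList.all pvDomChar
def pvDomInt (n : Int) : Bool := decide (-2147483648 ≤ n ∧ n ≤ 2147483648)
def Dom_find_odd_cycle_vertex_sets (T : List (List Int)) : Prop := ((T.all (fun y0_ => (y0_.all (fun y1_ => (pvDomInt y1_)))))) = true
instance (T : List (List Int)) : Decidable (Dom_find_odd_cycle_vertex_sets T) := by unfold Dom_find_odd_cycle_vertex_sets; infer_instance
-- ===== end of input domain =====

-- B replaces A's exhaustive permutation enumeration by a recursive backtracking path search
-- that extends only along existing edges (objective: alternative algorithm; return value only).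

-- ===== PORT A =====
-- truthiness test of T[a][b]; indices reached inside Pre_ are nonnegative and in range, where getD is exact
def pvEdge (T : List (List Int)) (a b : Int) : Bool :=
  ((T.getD a.toNat []).getD b.toNat 0) != 0

-- all(T[path[i]][path[(i + 1) % length]] for i in range(length))
def pvCycleAll (T : List (List Int)) (path : List Int) : Bool :=
  let length : Int := path.length
  (PySem.List.pyRange 0 length 1).all (fun i =>
    pvEdge T (PySem.List.pyGetD path i 0) (PySem.List.pyGetD path (PySem.Int.mod (i + 1) length) 0))

-- itertools.combinations(l, k), lexicographic order (both Source A and Source B use it)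
def pvCombos : List Int → Nat → List (List Int)
  | _, 0 => [[]]
  | [], _ + 1 => []
  | x :: xs, k + 1 => (pvCombos xs k).map (fun c => x :: c) ++ pvCombos xs (k + 1)

def find_odd_cycle_vertex_sets (T : List (List Int)) : List (List Int) :=
  let n : Int := T.length
  (PySem.List.pyRange 3 (n + 1) 2).foldl (fun cycle_vsets length =>
    (pvCombos (PySem.List.pyRange 0 n 1) length.toNat).foldl (fun cycle_vsets combo =>
      -- vset = frozenset(combo): combo is strictly increasing, so the tuple itself represents it
      if PySem.Set.contains cycle_vsets combo then cycle_vsets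
      else if (PySem.List.permutations (combo.drop 1) (combo.drop 1).length).any
                (fun perm => pvCycleAll T (combo.headD 0 :: perm))
      then PySem.Set.add cycle_vsets combo else cycle_vsets) cycle_vsets) []

-- ===== PORT B =====
-- extend(last, remaining, first) of Source B; fuel = remaining.length at every call
def pvExtend (T : List (List Int)) : Nat → Int → List Int → Int → Bool
  | _, last, [], first => pvEdge T last first
  | 0, _, _ :: _, _ => false
  | fuel + 1, last, r :: rs, first =>
      (List.range (r :: rs : List Int).length).any (fun i =>
        pvEdge T last ((r :: rs).getD i 0) &&
        pvExtend T fuel ((r :: rs).getD i 0) ((r :: rs).eraseIdx i) first)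

def find_odd_cycle_vertex_sets_alt (T : List (List Int)) : List (List Int) :=
  let n : Int := T.length
  (PySem.List.pyRange 3 (n + 1) 2).foldl (fun out length =>
    (pvCombos (PySem.List.pyRange 0 n 1) length.toNat).foldl (fun out combo =>
      if pvExtend T (combo.drop 1).length (combo.headD 0) (combo.drop 1) (combo.headD 0)
      then out ++ [combo] else out) out) []

-- ===== PRECONDITION & SPEC =====
-- Pre_ excludes ragged matrices (some row shorter than the number of rows, with at least 3 rows):
-- there Python A may raise IndexError, and whether it does depends on the lazy evaluation order of the
-- edge checks, which differs between A and B; on some such inputs A happens to return (zero entries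
-- short-circuit the check before any bad access).
def Pre_find_odd_cycle_vertex_sets (T : List (List Int)) : Prop :=
  T.length < 3 ∨ ∀ row ∈ T, T.length ≤ row.length
instance (T : List (List Int)) : Decidable (Pre_find_odd_cycle_vertex_sets T) := by unfold Pre_find_odd_cycle_vertex_sets; infer_instance

def pvWitness_find_odd_cycle_vertex_sets : List (List Int) := [[0, 1, 1], [1, 0, 1], [1, 1, 0]]

def Spec_find_odd_cycle_vertex_sets (T : List (List Int)) (out : List (List Int)) : Prop := out = find_odd_cycle_vertex_sets_alt T
instance (T : List (List Int)) (out : List (List Int)) : Decidable (Spec_find_odd_cycle_vertex_sets T out) := by unfold Spec_find_odd_cycle_vertex_sets; infer_instance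

-- ===== CLAIM (what is proved, stated in full; the proofs are below) =====
def Claim_equal_find_odd_cycle_vertex_sets : Prop := ∀ (T : List (List Int)), Dom_find_odd_cycle_vertex_sets T → Pre_find_odd_cycle_vertex_sets T → Spec_find_odd_cycle_vertex_sets T (find_odd_cycle_vertex_sets T)

-- ===== LEMMAS AND PROOFS =====

-- generic Bool list helpers
theorem pvAnyCongr {α : Type} (l : List α) (f g : α → Bool) (h : ∀ x ∈ l, f x = g x) :
    l.any f = l.any g := by
  induction l with
  | nil => rfl
  | cons a t ih =>
      simp only [List.any_cons, h a (List.mem_cons_self ..),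
        ih (fun x hx => h x (List.mem_cons_of_mem _ hx))]

theorem pvAllCongr {α : Type} (l : List α) (f g : α → Bool) (h : ∀ x ∈ l, f x = g x) :
    l.all f = l.all g := by
  induction l with
  | nil => rfl
  | cons a t ih =>
      simp only [List.all_cons, h a (List.mem_cons_self ..),
        ih (fun x hx => h x (List.mem_cons_of_mem _ hx))]

theorem pvAnyAndLeft {α : Type} (l : List α) (c : Bool) (p : α → Bool) :
    (l.any fun x => c && p x) = (c && l.any p) := by
  cases c <;> simp

-- the chain of edge tests a → v1 → … → vk → f
def pvChain (T : List (List Int)) : Int → List Int → Int → Bool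
  | last, [], first => pvEdge T last first
  | last, v :: vs, first => pvEdge T last v && pvChain T v vs first

theorem pvChain_eq_all (T : List (List Int)) :
    ∀ (t : List Int) (a f : Int),
      pvChain T a t f
        = (List.range (t.length + 1)).all
            (fun k => pvEdge T ((a :: t).getD k 0) ((t ++ [f]).getD k 0)) := by
  intro t
  induction t with
  | nil => intro a f; simp [pvChain, List.range_one]
  | cons v vs ih =>
      intro a f
      rw [List.range_succ_eq_map]
      simp only [List.all_cons, List.all_map, pvChain]
      rw [ih v f]
      rfl

theorem pvCycleAll_eq_chain (T : List (List Int)) (h : Int) (t : List Int) :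
    pvCycleAll T (h :: t) = pvChain T h t h := by
  rw [pvChain_eq_all]
  show (PySem.List.pyRange 0 ((h :: t).length : Int) 1).all _ = _
  rw [PySem.List.pyRange_one]
  rw [List.all_map]
  simp only [List.length_cons, Int.sub_zero, Int.toNat_natCast]
  apply pvAllCongr
  intro k hk
  rw [List.mem_range] at hk
  simp only [Function.comp, Int.zero_add]
  have hmod : PySem.Int.mod ((k : Int) + 1) ((t.length + 1 : Nat) : Int)
      = (((k + 1) % (t.length + 1) : Nat) : Int) := by
    show Int.fmod _ _ = _
    rw [Int.fmod_eq_emod]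
    rw [if_pos (Or.inl (by positivity : (0:Int) ≤ _))]
    rw [add_zero]
    push_cast
    rfl
  rw [hmod]
  rw [PySem.List.pyGetD_natCast, PySem.List.pyGetD_natCast]
  congr 1
  · -- second index: rotation
    rcases Nat.lt_or_ge k t.length with hlt | hge
    · have h1 : (k + 1) % (t.length + 1) = k + 1 := Nat.mod_eq_of_lt (by omega)
      rw [h1]
      rw [List.getD_cons_succ]
      rw [List.getD_append _ _ _ _ hlt]
    · have hk' : k = t.length := by omega
      subst hk'
      have h1 : (t.length + 1) % (t.length + 1) = 0 := Nat.mod_self _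
      rw [h1, List.getD_cons_zero]
      rw [List.getD_eq_getElem?_getD, List.getElem?_append_right (le_refl _)]
      simp

-- PySem.List.permutations step equation
theorem pvPerm_succ {α : Type} (xs : List α) (r : Nat) :
    PySem.List.permutations xs (r + 1)
      = (List.range xs.length).flatMap (fun i =>
          match xs[i]? with
          | none => []
          | some v => (PySem.List.permutations (xs.eraseIdx i) r).map (fun p => v :: p)) := rfl

-- heart of the proof: brute-force search over all permutations = backtracking DFS
theorem pvMainEq (T : List (List Int)) :
    ∀ (fuel : Nat) (l : List Int), l.length = fuel → ∀ (a f : Int),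
      (PySem.List.permutations l fuel).any (fun p => pvChain T a p f) = pvExtend T fuel a l f := by
  intro fuel
  induction fuel with
  | zero =>
      intro l hl a f
      rw [List.length_eq_zero_iff] at hl; subst hl
      simp [pvChain, pvExtend]
  | succ m ih =>
      intro l hl a f
      match l, hl with
      | x :: xs, hl =>
        rw [pvPerm_succ, List.any_flatMap]
        show _ = pvExtend T (m + 1) a (x :: xs) f
        rw [pvExtend]
        apply pvAnyCongr
        intro i hi
        rw [List.mem_range] at hi
        rw [List.getElem?_eq_getElem hi]
        simp only [List.any_map, Function.comp_def]
        simp only [pvChain]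
        rw [pvAnyAndLeft]
        rw [ih ((x :: xs).eraseIdx i) (by rw [List.length_eraseIdx, if_pos hi]; omega)]
        rw [List.getD_eq_getElem _ _ hi]

-- per-combo: A's acceptance condition equals B's
theorem pvCondEq (T : List (List Int)) (c : List Int) :
    (PySem.List.permutations (c.drop 1) (c.drop 1).length).any
        (fun perm => pvCycleAll T (c.headD 0 :: perm))
      = pvExtend T (c.drop 1).length (c.headD 0) (c.drop 1) (c.headD 0) := by
  have : ∀ p, pvCycleAll T (c.headD 0 :: p) = pvChain T (c.headD 0) p (c.headD 0) :=
    fun p => pvCycleAll_eq_chain T _ p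
  simp only [this]
  exact pvMainEq T _ _ rfl _ _

-- facts about pvCombos
theorem pvCombos_length : ∀ (l : List Int) (k : Nat) (c : List Int), c ∈ pvCombos l k → c.length = k := by
  intro l
  induction l with
  | nil => intro k c hc; cases k <;> simp [pvCombos] at hc; simp [hc]
  | cons x xs ih =>
      intro k c hc
      cases k with
      | zero => simp [pvCombos] at hc; simp [hc]
      | succ k =>
          simp only [pvCombos, List.mem_append, List.mem_map] at hc
          rcases hc with ⟨c', hc', rfl⟩ | hc
          · rw [List.length_cons, ih _ _ hc']
          · exact ih _ _ hc

theorem pvCombos_subset : ∀ (l : List Int) (k : Nat) (c : List Int), c ∈ pvCombos l k → ∀ v ∈ c, v ∈ l := by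
  intro l
  induction l with
  | nil => intro k c hc; cases k <;> simp [pvCombos] at hc; simp [hc]
  | cons x xs ih =>
      intro k c hc v hv
      cases k with
      | zero => simp [pvCombos] at hc; subst hc; simp at hv
      | succ k =>
          simp only [pvCombos, List.mem_append, List.mem_map] at hc
          rcases hc with ⟨c', hc', rfl⟩ | hc
          · rcases List.mem_cons.mp hv with rfl | hv
            · exact List.mem_cons_self ..
            · exact List.mem_cons_of_mem _ (ih _ _ hc' v hv)
          · exact List.mem_cons_of_mem _ (ih _ _ hc v hv)

theorem pvCombos_nodup : ∀ (l : List Int), l.Nodup → ∀ (k : Nat), (pvCombos l k).Nodup := by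
  intro l
  induction l with
  | nil => intro _ k; cases k <;> simp [pvCombos]
  | cons x xs ih =>
      intro hnd k
      have hx : x ∉ xs := (List.nodup_cons.mp hnd).1
      have hxs : xs.Nodup := (List.nodup_cons.mp hnd).2
      cases k with
      | zero => simp [pvCombos]
      | succ k =>
          simp only [pvCombos]
          apply List.Nodup.append
          · exact (ih hxs k).map (fun a b h => by injection h)
          · exact ih hxs (k + 1)
          · intro c hc1 hc2
            rcases List.mem_map.mp hc1 with ⟨c', _, rfl⟩
            exact hx (pvCombos_subset xs (k + 1) _ hc2 x (List.mem_cons_self ..))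

-- fold over nested loops = fold over the flattened combo list
theorem pvFoldFlat {α β σ : Type} (xs : List α) (g : α → List β) (step : σ → β → σ) (init : σ) :
    xs.foldl (fun a x => (g x).foldl step a) init = (xs.flatMap g).foldl step init := by
  induction xs generalizing init with
  | nil => rfl
  | cons x xs ih => simp [List.flatMap_cons, List.foldl_append, ih]

-- the dead duplicate check of A: on a Nodup combo list starting from an accumulator
-- containing none of them, A's set-fold equals B's append-fold
theorem pvFoldAB (P : List Int → Bool) :
    ∀ (C : List (List Int)) (acc : List (List Int)), C.Nodup → (∀ c ∈ C, c ∉ acc) →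
      C.foldl (fun s c => if PySem.Set.contains s c then s
                          else if P c then PySem.Set.add s c else s) acc
        = C.foldl (fun s c => if P c then s ++ [c] else s) acc := by
  intro C
  induction C with
  | nil => intro acc _ _; rfl
  | cons c C ih =>
      intro acc hnd hout
      have hc : c ∉ acc := hout c (List.mem_cons_self ..)
      have hcont : PySem.Set.contains acc c = false := by
        rw [← Bool.not_eq_true, PySem.Set.contains_iff]; exact hc
      have hadd : PySem.Set.add acc c = acc ++ [c] := by
        unfold PySem.Set.add; rw [hcont]; simp
      have hA : (if PySem.Set.contains acc c then acc
                 else if P c then PySem.Set.add acc c else acc)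
          = (if P c then acc ++ [c] else acc) := by
        rw [hcont, hadd]; simp
      rw [List.foldl_cons, List.foldl_cons, hA]
      by_cases hp : P c = true
      · rw [if_pos hp]
        exact ih (acc ++ [c]) (List.nodup_cons.mp hnd).2 (fun c' hc' => by
          simp only [List.mem_append, List.mem_singleton]
          rintro (h | rfl)
          · exact hout c' (List.mem_cons_of_mem _ hc') h
          · exact (List.nodup_cons.mp hnd).1 hc')
      · rw [if_neg hp]
        exact ih acc (List.nodup_cons.mp hnd).2
          (fun c' hc' => hout c' (List.mem_cons_of_mem _ hc'))

-- the flattened list of all candidate combos is Nodup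
theorem pvFlatNodup (n : Int) :
    ((PySem.List.pyRange 3 (n + 1) 2).flatMap
      (fun len => pvCombos (PySem.List.pyRange 0 n 1) len.toNat)).Nodup := by
  rw [List.nodup_flatMap]
  constructor
  · intro len _
    exact pvCombos_nodup _ (PySem.List.nodup_pyRange_one 0 n) _
  · rw [PySem.List.pyRange_of_pos 3 (n + 1) (by norm_num)]
    rw [List.pairwise_map]
    apply List.Pairwise.imp_of_mem (l := List.range _) ?_ (List.pairwise_lt_range)
    intro k1 k2 hk1 hk2 hlt c hc1 hc2
    have h1 := pvCombos_length _ _ _ hc1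
    have h2 := pvCombos_length _ _ _ hc2
    rw [h1] at h2
    omega

-- ===== VERDICT (by name: the statement is the Claim_ definition above) =====
theorem find_odd_cycle_vertex_sets_spec : Claim_equal_find_odd_cycle_vertex_sets := by
  unfold Claim_equal_find_odd_cycle_vertex_sets
  intro T _ _
  unfold Spec_find_odd_cycle_vertex_sets
  unfold find_odd_cycle_vertex_sets find_odd_cycle_vertex_sets_alt
  have hstep : (fun (s : List (List Int)) (combo : List Int) =>
      if PySem.Set.contains s combo then s
      else if (PySem.List.permutations (combo.drop 1) (combo.drop 1).length).any
                (fun perm => pvCycleAll T (combo.headD 0 :: perm))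
      then PySem.Set.add s combo else s)
      = (fun s combo =>
      if PySem.Set.contains s combo then s
      else if pvExtend T (combo.drop 1).length (combo.headD 0) (combo.drop 1) (combo.headD 0)
      then PySem.Set.add s combo else s) := by
    funext s combo; rw [pvCondEq]
  rw [hstep]
  rw [pvFoldFlat, pvFoldFlat]
  exact pvFoldAB _ _ [] (pvFlatNodup _) (by simp)
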